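-- pv_equiv track=rewrite | github.com/diwakar-1255/AI-Interview-Coach | backend/app.py | merge_feedback_lists
-- ===== SOURCE A (Python) =====
-- def merge_feedback_lists(existing_feedback, incoming_feedback):
--     merged = existing_feedback[:]
--     if not isinstance(incoming_feedback, list):
--         return merged
--     while len(merged) < len(incoming_feedback):
--         merged.append(None)
--     for i, item in enumerate(incoming_feedback):
--         if item:
--             merged[i] = item
--     return merged
-- ===== SOURCE B (Python) =====
-- def merge_feedback_lists(existing_feedback, incoming_feedback):
--     if not isinstance(incoming_feedback, list):
--         return existing_feedback[:]
--     out = []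
--     e_iter = iter(existing_feedback)
--     for item in incoming_feedback:
--         cur = next(e_iter, None)
--         out.append(item if item else cur)
--     out.extend(e_iter)
--     return out
-- ===== Notes on version B (the rewrite author's own statement) =====
-- stated objective: idiomatic
-- what changed: Replaces copy-then-pad-then-index-overwrite with an index-free pairwise traversal: walk the incoming list against an iterator over existing, emit item or the paired existing element front-to-back, then extend with the leftover existing tail.
import Mathlib
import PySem

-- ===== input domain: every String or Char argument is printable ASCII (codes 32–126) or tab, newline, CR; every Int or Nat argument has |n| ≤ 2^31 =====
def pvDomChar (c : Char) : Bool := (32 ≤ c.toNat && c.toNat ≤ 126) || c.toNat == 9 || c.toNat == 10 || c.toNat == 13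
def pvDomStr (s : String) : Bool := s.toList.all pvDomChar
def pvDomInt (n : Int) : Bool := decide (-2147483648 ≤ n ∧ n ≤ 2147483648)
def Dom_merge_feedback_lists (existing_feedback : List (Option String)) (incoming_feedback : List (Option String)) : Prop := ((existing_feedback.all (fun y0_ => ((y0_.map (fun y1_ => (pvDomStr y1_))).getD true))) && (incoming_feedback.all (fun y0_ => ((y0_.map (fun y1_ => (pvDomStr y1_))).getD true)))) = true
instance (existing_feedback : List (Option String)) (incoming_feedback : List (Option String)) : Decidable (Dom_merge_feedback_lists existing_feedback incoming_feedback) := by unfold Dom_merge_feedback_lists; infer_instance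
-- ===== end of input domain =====

-- B replaces A's copy-then-pad-then-index-overwrite with an index-free pairwise
-- traversal (walk incoming against existing, emit front-to-back, append the leftover
-- existing tail); same values everywhere (objective: idiomatic).

-- Python truthiness of an Optional[str] item: None and "" are falsy.
def pvTruthy (o : Option String) : Bool :=
  match o with
  | none => false
  | some s => s != ""

-- ===== PORT A =====
-- the `while len(merged) < len(incoming_feedback): merged.append(None)` loop
def pvPad (merged : List (Option String)) (n : Nat) : List (Option String) :=
  if merged.length < n then pvPad (merged ++ [none]) n else merged
termination_by n - merged.length
decreasing_by simp; omega

def merge_feedback_lists (existing_feedback : List (Option String)) (incoming_feedback : List (Option String)) : List (Option String) :=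
  -- merged = existing_feedback[:]  (the isinstance guard is vacuous under the type convention)
  let merged := existing_feedback
  let merged := pvPad merged incoming_feedback.length
  -- for i, item in enumerate(incoming_feedback): if item: merged[i] = item
  (PySem.List.enumerate incoming_feedback).foldl
    (fun m p => if pvTruthy p.2 then PySem.List.pySetD m p.1 p.2 else m) merged

-- ===== PORT B =====
-- the `for item in incoming: cur = next(e_iter, None); out.append(item if item else cur)`
-- loop followed by `out.extend(e_iter)`: structural recursion consuming both lists
def pvZipMerge : List (Option String) → List (Option String) → List (Option String)
  | e, [] => e                                    -- out.extend(e_iter)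
  | [], item :: t =>                              -- next(e_iter, None) = None
      (if pvTruthy item then item else none) :: pvZipMerge [] t
  | c :: e, item :: t =>
      (if pvTruthy item then item else c) :: pvZipMerge e t

def merge_feedback_lists_alt (existing_feedback : List (Option String)) (incoming_feedback : List (Option String)) : List (Option String) :=
  pvZipMerge existing_feedback incoming_feedback

-- ===== PRECONDITION & SPEC =====
def Spec_merge_feedback_lists (existing_feedback : List (Option String)) (incoming_feedback : List (Option String)) (out : List (Option String)) : Prop := out = merge_feedback_lists_alt existing_feedback incoming_feedback
instance (existing_feedback : List (Option String)) (incoming_feedback : List (Option String)) (out : List (Option String)) : Decidable (Spec_merge_feedback_lists existing_feedback incoming_feedback out) := by unfold Spec_merge_feedback_lists; infer_instance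

-- ===== CLAIM (what is proved, stated in full; the proofs are below) =====
def Claim_equal_merge_feedback_lists : Prop := ∀ (existing_feedback : List (Option String)) (incoming_feedback : List (Option String)), Dom_merge_feedback_lists existing_feedback incoming_feedback → Spec_merge_feedback_lists existing_feedback incoming_feedback (merge_feedback_lists existing_feedback incoming_feedback)

-- ===== LEMMAS AND PROOFS =====

lemma pvPad_eq (merged : List (Option String)) (n : Nat) :
    pvPad merged n = merged ++ List.replicate (n - merged.length) none := by
  induction hfuel : n - merged.length generalizing merged with
  | zero =>
      rw [pvPad, if_neg (by omega)]
      simp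
  | succ f ih =>
      rw [pvPad, if_pos (by omega)]
      rw [ih (merged ++ [none]) (by simp; omega)]
      simp [List.replicate_succ]

lemma fold_get? (l : List (Option String)) (s : Nat) (m : List (Option String))
    (h : s + l.length ≤ m.length) (k : Nat) :
    ((PySem.List.enumerate l (s : Int)).foldl
      (fun m p => if pvTruthy p.2 then PySem.List.pySetD m p.1 p.2 else m) m)[k]?
      = if s ≤ k ∧ k < s + l.length ∧ pvTruthy (l.getD (k - s) none) then
          some (l.getD (k - s) none)
        else m[k]? := by
  induction l generalizing s m with
  | nil =>
      rw [PySem.List.enumerate_nil, List.foldl_nil,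
        if_neg (by rintro ⟨h1, h2, -⟩; simp at h2; omega)]
  | cons a t ih =>
      rw [PySem.List.enumerate_cons, List.foldl_cons]
      have hs1 : ((s : Int) + 1) = ((s + 1 : Nat) : Int) := by push_cast; ring
      simp only [hs1]
      set m' := (if pvTruthy ((s : Int), a).2 then PySem.List.pySetD m ((s : Int), a).1 ((s : Int), a).2 else m)
        with hm'
      have hmlen : m'.length = m.length := by
        rw [hm']; split
        · rw [PySem.List.length_pySetD]
        · rfl
      have hlen : (s + 1) + t.length ≤ m'.length := by
        rw [hmlen]; simp at h; omega
      rw [ih (s + 1) m' hlen]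
      have hm'k : ∀ k', k' ≠ s → m'[k']? = m[k']?  := by
        intro k' hk'
        rw [hm']; split
        · rw [PySem.List.pySetD_natCast, List.getElem?_set_ne (fun hh => hk' hh.symm)]
        · rfl
      rcases lt_trichotomy k s with hlt | heq | hgt
      · rw [if_neg (by rintro ⟨h1, -, -⟩; omega),
          if_neg (by rintro ⟨h1, -, -⟩; omega), hm'k k (by omega)]
      · subst heq
        have hklt : k < m.length := by simp at h; omega
        by_cases ha : pvTruthy a
        · rw [if_neg (by rintro ⟨h1, -, -⟩; omega),
            if_pos ⟨le_refl k, by simp, by simpa using ha⟩]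
          rw [hm']
          simp only [ha, if_pos]
          rw [PySem.List.pySetD_natCast]
          simp [hklt]
        · rw [if_neg (by rintro ⟨h1, -, -⟩; omega),
            if_neg (by rintro ⟨-, -, h3⟩; simp at h3; exact ha (by simpa using h3))]
          rw [hm']
          simp [ha]
      · have hgd : (a :: t).getD (k - s) none = t.getD (k - (s + 1)) none := by
          rw [show k - s = (k - (s + 1)) + 1 by omega]
          rfl
        rw [hm'k k (by omega)]
        have hcond : (s + 1 ≤ k ∧ k < s + 1 + t.length ∧ pvTruthy (t.getD (k - (s + 1)) none) = true)
            ↔ (s ≤ k ∧ k < s + (a :: t).length ∧ pvTruthy ((a :: t).getD (k - s) none) = true) := by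
          rw [hgd]
          constructor
          · rintro ⟨h1, h2, h3⟩
            exact ⟨by omega, by simp; omega, h3⟩
          · rintro ⟨h1, h2, h3⟩
            exact ⟨by omega, by simp at h2; omega, h3⟩
        by_cases hc : s + 1 ≤ k ∧ k < s + 1 + t.length ∧ pvTruthy (t.getD (k - (s + 1)) none) = true
        · rw [if_pos hc, if_pos (hcond.mp hc), hgd]
        · rw [if_neg hc, if_neg (fun h' => hc (hcond.mpr h'))]

lemma padded_get? (e : List (Option String)) (n : Nat) (k : Nat) (hn : e.length ≤ n) :
    (e ++ List.replicate (n - e.length) none)[k]? =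
      if k < n then some (e.getD k none) else none := by
  rcases Nat.lt_or_ge k e.length with hk | hk
  · rw [List.getElem?_append_left hk, if_pos (by omega)]
    simp [List.getD_eq_getElem?_getD, List.getElem?_eq_getElem hk]
  · rw [List.getElem?_append_right hk]
    rcases Nat.lt_or_ge k n with h2 | h2
    · rw [if_pos h2]
      have hlt : k - e.length < n - e.length := by omega
      simp [hlt, List.getD_eq_getElem?_getD, List.getElem?_eq_none hk]
    · rw [if_neg (by omega)]
      apply List.getElem?_eq_none
      simp
      omega

-- pointwise characterisation of B's pairwise traversal
lemma pvZipMerge_get? (e inc : List (Option String)) (k : Nat) :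
    (pvZipMerge e inc)[k]? =
      if k < max e.length inc.length then
        some (if k < inc.length ∧ pvTruthy (inc.getD k none) then inc.getD k none
              else e.getD k none)
      else none := by
  induction inc generalizing e k with
  | nil =>
      simp only [pvZipMerge, List.length_nil, Nat.max_zero]
      have hc : ¬ (k < 0 ∧ pvTruthy (List.getD [] k none) = true) := by rintro ⟨h1, -⟩; omega
      rw [if_neg hc]
      rcases Nat.lt_or_ge k e.length with hk | hk
      · rw [if_pos hk, List.getElem?_eq_getElem hk]
        simp [List.getD_eq_getElem?_getD, List.getElem?_eq_getElem hk]
      · rw [if_neg (by omega), List.getElem?_eq_none hk]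
  | cons item t ih =>
      cases e with
      | nil =>
          cases k with
          | zero =>
              by_cases ht : pvTruthy item <;>
                simp [pvZipMerge, ht, List.getD]
          | succ k' =>
              simp only [pvZipMerge, List.getElem?_cons_succ, ih [] k',
                List.length_cons, List.length_nil, List.getD_cons_succ]
              simp only [show (k' + 1 < max 0 (t.length + 1)) ↔ (k' < max 0 t.length) from by omega,
                show (k' + 1 < t.length + 1) ↔ (k' < t.length) from by omega, List.getD]
              simp
      | cons c e' =>
          cases k with
          | zero =>
              by_cases ht : pvTruthy item <;>
                simp [pvZipMerge, ht, List.getD]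
          | succ k' =>
              simp only [pvZipMerge, List.getElem?_cons_succ, ih e' k',
                List.length_cons, List.getD_cons_succ]
              simp only [show (k' + 1 < max (e'.length + 1) (t.length + 1)) ↔ (k' < max e'.length t.length) from by omega,
                show (k' + 1 < t.length + 1) ↔ (k' < t.length) from by omega]

lemma merge_ports_eq (e inc : List (Option String)) :
    merge_feedback_lists e inc = merge_feedback_lists_alt e inc := by
  apply List.ext_getElem?
  intro k
  unfold merge_feedback_lists merge_feedback_lists_alt
  set n := max e.length inc.length with hn
  have hpad : pvPad e inc.length = e ++ List.replicate (n - e.length) none := by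
    rw [pvPad_eq, show inc.length - e.length = n - e.length from by omega]
  simp only [hpad]
  have hcast : (PySem.List.enumerate inc : List (Int × Option String)) =
      PySem.List.enumerate inc ((0 : Nat) : Int) := by norm_num
  rw [hcast, fold_get? inc 0 _ (by simp only [List.length_append, List.length_replicate, hn]; omega) k]
  simp only [Nat.zero_add, Nat.zero_le, true_and, Nat.sub_zero]
  rw [padded_get? e n k (by omega), pvZipMerge_get? e inc k]
  by_cases hc : k < inc.length ∧ pvTruthy (inc.getD k none) = true
  · rw [if_pos hc, if_pos (by omega), if_pos hc]
  · rw [if_neg hc]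
    by_cases hkn : k < n
    · rw [if_pos hkn, if_pos hkn, if_neg hc]
    · rw [if_neg hkn, if_neg hkn]

-- ===== VERDICT (by name: the statement is the Claim_ definition above) =====
theorem merge_feedback_lists_spec : Claim_equal_merge_feedback_lists := by
  intro e inc _
  exact merge_ports_eq e inc
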